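-- pv_equiv track=rewrite | github.com/FengyichenEason/TMAIM | AIM_tolls.py | make_traffic_light_table
-- ===== SOURCE A (Python) =====
-- def make_traffic_light_table(total_time, cycle_time):
--     """设计信号灯控制，根据总控制时间和循环周期时长来制作红灯时段表，返回两个列表，分别是每条道路的红灯起始时间和结束时间
--     要求total_time和 cycle_time必须是4的倍数，且total_time模cycle_time(余数）不能超过（不大于）cycle_time的0.5
--     倍，否则会存在某条路上开始时刻的红灯没被记录上"""
--     slight = []
--     elight = []
--     for i in range(8):
--         slight.append([])
--         elight.append([])
--         J = int(total_time / cycle_time) + 1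
--     for i in range(J):
--         for j in range(len(slight)):
--             if i * cycle_time + (j % 4) * (cycle_time / 4) < total_time:
--                 slight[j].append(int(i * cycle_time + (j % 4) * (cycle_time / 4)))
--                 elight[j].append(int(min(slight[j][i] + 3 / 4 * cycle_time, total_time)))
--             elif slight[j][0] - cycle_time / 4 > 0:
--                 slight[j].append(0)
--                 elight[j].append(int(slight[j][0] - cycle_time / 4))
--             else:
--                 slight[j].append(slight[j][0])
--                 elight[j].append(elight[j][0])
--     return slight, elight
-- ===== SOURCE B (Python) =====
-- def make_traffic_light_table(total_time, cycle_time):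
--     # Same table, built from the four distinct phase patterns (road j depends
--     # only on j % 4), then duplicated into 8 independent lists.
--     J = int(total_time / cycle_time) + 1
--     pat_s = []
--     pat_e = []
--     for r in range(4):
--         s = []
--         e = []
--         for i in range(J):
--             start = i * cycle_time + r * (cycle_time / 4)
--             if start < total_time:
--                 si = int(start)
--                 s.append(si)
--                 e.append(int(min(si + 3 / 4 * cycle_time, total_time)))
--             else:
--                 first = s[0]
--                 if first - cycle_time / 4 > 0:
--                     s.append(0)
--                     e.append(int(first - cycle_time / 4))
--                 else:
--                     s.append(first)
--                     e.append(e[0])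
--         pat_s.append(s)
--         pat_e.append(e)
--     slight = [list(pat_s[j % 4]) for j in range(8)]
--     elight = [list(pat_e[j % 4]) for j in range(8)]
--     return slight, elight
-- ===== Notes on version B (the rewrite author's own statement) =====
-- stated objective: alternative
-- what changed: B exploits that road j's schedule depends only on j % 4: it computes the four phase patterns once with a per-pattern loop (tracking first start/end in locals instead of re-indexing slight[j][0]/slight[j][i]) and then duplicates them into the eight independent output lists, instead of A's row-by-row loop that mutates all eight lists per cycle.
import Mathlib
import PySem

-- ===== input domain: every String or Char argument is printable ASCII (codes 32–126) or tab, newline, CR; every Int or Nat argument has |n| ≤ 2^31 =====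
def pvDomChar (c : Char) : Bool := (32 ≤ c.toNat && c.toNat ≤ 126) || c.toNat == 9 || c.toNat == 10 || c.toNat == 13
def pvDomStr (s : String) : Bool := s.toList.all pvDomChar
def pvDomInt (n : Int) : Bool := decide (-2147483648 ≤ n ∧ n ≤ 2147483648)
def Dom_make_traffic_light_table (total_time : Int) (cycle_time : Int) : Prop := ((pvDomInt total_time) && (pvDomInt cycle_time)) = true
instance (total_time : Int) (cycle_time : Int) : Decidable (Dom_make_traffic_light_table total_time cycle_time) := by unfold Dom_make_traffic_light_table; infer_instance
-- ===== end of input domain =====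

-- B builds the four distinct phase patterns once (road j only depends on j % 4) and
-- duplicates them into 8 independent lists; same values, half the per-row work.
-- Float arithmetic of the Python is ported as integers scaled by 4: on Dom all the
-- floats involved are exact multiples of 1/4 with magnitude < 2^53, so this is exact;
-- Python's int() truncation is Int.tdiv by 4 (both truncate toward zero).

-- ===== PORT A =====
-- one body of A's inner loop over j (mutation of slight[j]/elight[j] ported as List.set)
def pvInner (t c i : Int) (st : List (List Int) × List (List Int)) (j : Nat) :
    List (List Int) × List (List Int) :=
  let sj := st.1.getD j []
  let ej := st.2.getD j []
  let r : Int := ((j % 4 : Nat) : Int)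
  -- start4 = 4 * (i*cycle_time + (j%4)*(cycle_time/4)), exact
  let start4 := 4 * i * c + r * c
  if start4 < 4 * t then
    let si := start4.tdiv 4                      -- int(i*c + r*c/4); slight[j][i] is this value
    (st.1.set j (sj ++ [si]),
     st.2.set j (ej ++ [(min (4 * si + 3 * c) (4 * t)).tdiv 4]))
  else if 4 * (sj.getD 0 0) - c > 0 then
    (st.1.set j (sj ++ [0]),
     st.2.set j (ej ++ [(4 * (sj.getD 0 0) - c).tdiv 4]))
  else
    (st.1.set j (sj ++ [sj.getD 0 0]), st.2.set j (ej ++ [ej.getD 0 0]))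

def make_traffic_light_table (total_time : Int) (cycle_time : Int) :
    List (List Int) × List (List Int) :=
  -- first loop: append 8 empty lists to each table (J is recomputed 8 times, same value)
  let init := (List.range 8).foldl
    (fun (st : List (List Int) × List (List Int)) _ => (st.1 ++ [[]], st.2 ++ [[]])) ([], [])
  let J := total_time.tdiv cycle_time + 1        -- int(total_time/cycle_time)+1, exact on Dom
  (PySem.List.pyRange 0 J 1).foldl
    (fun st i => (List.range 8).foldl (pvInner total_time cycle_time i) st) init

-- ===== PORT B =====
-- one body of B's inner loop over i for phase pattern r (same ×4 scaling as above)
def pvColStep (t c r : Int) (p : List Int × List Int) (i : Int) : List Int × List Int :=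
  let start4 := 4 * i * c + r * c
  if start4 < 4 * t then
    let si := start4.tdiv 4
    (p.1 ++ [si], p.2 ++ [(min (4 * si + 3 * c) (4 * t)).tdiv 4])
  else if 4 * (p.1.getD 0 0) - c > 0 then
    (p.1 ++ [0], p.2 ++ [(4 * (p.1.getD 0 0) - c).tdiv 4])
  else
    (p.1 ++ [p.1.getD 0 0], p.2 ++ [p.2.getD 0 0])

def make_traffic_light_table_alt (total_time : Int) (cycle_time : Int) :
    List (List Int) × List (List Int) :=
  let J := total_time.tdiv cycle_time + 1
  let pats := (List.range 4).map
    (fun r => (PySem.List.pyRange 0 J 1).foldl (pvColStep total_time cycle_time (r : Int)) ([], []))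
  ((List.range 8).map (fun j => (pats.getD (j % 4) ([], [])).1),
   (List.range 8).map (fun j => (pats.getD (j % 4) ([], [])).2))

-- ===== PRECONDITION & SPEC =====
-- Pre_ is exactly where Python A returns: cycle_time = 0 raises ZeroDivisionError, and
-- whenever the very first row of the second loop reaches the elif/else on an empty
-- slight[j] (i.e. the loop runs but some phase start is already ≥ total_time at i = 0)
-- slight[j][0] raises IndexError.
def Pre_make_traffic_light_table (total_time : Int) (cycle_time : Int) : Prop :=
  cycle_time ≠ 0 ∧
    ((0 < cycle_time ∧ (3 * cycle_time < 4 * total_time ∨ total_time ≤ -cycle_time)) ∨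
     (cycle_time < 0 ∧ 0 < total_time))
instance (total_time : Int) (cycle_time : Int) : Decidable (Pre_make_traffic_light_table total_time cycle_time) := by unfold Pre_make_traffic_light_table; infer_instance
def pvWitness_make_traffic_light_table : Int × Int := (8, 4)

def Spec_make_traffic_light_table (total_time : Int) (cycle_time : Int) (out : List (List Int) × List (List Int)) : Prop := out = make_traffic_light_table_alt total_time cycle_time
instance (total_time : Int) (cycle_time : Int) (out : List (List Int) × List (List Int)) : Decidable (Spec_make_traffic_light_table total_time cycle_time out) := by unfold Spec_make_traffic_light_table; infer_instance

-- ===== CLAIM (what is proved, stated in full; the proofs are below) =====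
def Claim_equal_make_traffic_light_table : Prop := ∀ (total_time : Int) (cycle_time : Int), Dom_make_traffic_light_table total_time cycle_time → Pre_make_traffic_light_table total_time cycle_time → Spec_make_traffic_light_table total_time cycle_time (make_traffic_light_table total_time cycle_time)

-- ===== LEMMAS AND PROOFS =====

-- A's inner loop acts on column j only through entry j: a single pvInner call at
-- literal index j replaces column j by its pvColStep image with phase j % 4.
lemma pvInner_col0 (t c i : Int) (p0 p1 p2 p3 p4 p5 p6 p7 : List Int × List Int) :
    pvInner t c i ([p0.1, p1.1, p2.1, p3.1, p4.1, p5.1, p6.1, p7.1],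
                   [p0.2, p1.2, p2.2, p3.2, p4.2, p5.2, p6.2, p7.2]) 0
    = ([(pvColStep t c 0 p0 i).1, p1.1, p2.1, p3.1, p4.1, p5.1, p6.1, p7.1],
       [(pvColStep t c 0 p0 i).2, p1.2, p2.2, p3.2, p4.2, p5.2, p6.2, p7.2]) := by
  unfold pvInner pvColStep
  norm_num [List.getD, List.set]
  split_ifs <;> simp

lemma pvInner_col1 (t c i : Int) (p0 p1 p2 p3 p4 p5 p6 p7 : List Int × List Int) :
    pvInner t c i ([p0.1, p1.1, p2.1, p3.1, p4.1, p5.1, p6.1, p7.1],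
                   [p0.2, p1.2, p2.2, p3.2, p4.2, p5.2, p6.2, p7.2]) 1
    = ([p0.1, (pvColStep t c 1 p1 i).1, p2.1, p3.1, p4.1, p5.1, p6.1, p7.1],
       [p0.2, (pvColStep t c 1 p1 i).2, p2.2, p3.2, p4.2, p5.2, p6.2, p7.2]) := by
  unfold pvInner pvColStep
  norm_num [List.getD, List.set]
  split_ifs <;> simp

lemma pvInner_col2 (t c i : Int) (p0 p1 p2 p3 p4 p5 p6 p7 : List Int × List Int) :
    pvInner t c i ([p0.1, p1.1, p2.1, p3.1, p4.1, p5.1, p6.1, p7.1],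
                   [p0.2, p1.2, p2.2, p3.2, p4.2, p5.2, p6.2, p7.2]) 2
    = ([p0.1, p1.1, (pvColStep t c 2 p2 i).1, p3.1, p4.1, p5.1, p6.1, p7.1],
       [p0.2, p1.2, (pvColStep t c 2 p2 i).2, p3.2, p4.2, p5.2, p6.2, p7.2]) := by
  unfold pvInner pvColStep
  norm_num [List.getD, List.set]
  split_ifs <;> simp

lemma pvInner_col3 (t c i : Int) (p0 p1 p2 p3 p4 p5 p6 p7 : List Int × List Int) :
    pvInner t c i ([p0.1, p1.1, p2.1, p3.1, p4.1, p5.1, p6.1, p7.1],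
                   [p0.2, p1.2, p2.2, p3.2, p4.2, p5.2, p6.2, p7.2]) 3
    = ([p0.1, p1.1, p2.1, (pvColStep t c 3 p3 i).1, p4.1, p5.1, p6.1, p7.1],
       [p0.2, p1.2, p2.2, (pvColStep t c 3 p3 i).2, p4.2, p5.2, p6.2, p7.2]) := by
  unfold pvInner pvColStep
  norm_num [List.getD, List.set]
  split_ifs <;> simp

lemma pvInner_col4 (t c i : Int) (p0 p1 p2 p3 p4 p5 p6 p7 : List Int × List Int) :
    pvInner t c i ([p0.1, p1.1, p2.1, p3.1, p4.1, p5.1, p6.1, p7.1],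
                   [p0.2, p1.2, p2.2, p3.2, p4.2, p5.2, p6.2, p7.2]) 4
    = ([p0.1, p1.1, p2.1, p3.1, (pvColStep t c 0 p4 i).1, p5.1, p6.1, p7.1],
       [p0.2, p1.2, p2.2, p3.2, (pvColStep t c 0 p4 i).2, p5.2, p6.2, p7.2]) := by
  unfold pvInner pvColStep
  norm_num [List.getD, List.set]
  split_ifs <;> simp

lemma pvInner_col5 (t c i : Int) (p0 p1 p2 p3 p4 p5 p6 p7 : List Int × List Int) :
    pvInner t c i ([p0.1, p1.1, p2.1, p3.1, p4.1, p5.1, p6.1, p7.1],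
                   [p0.2, p1.2, p2.2, p3.2, p4.2, p5.2, p6.2, p7.2]) 5
    = ([p0.1, p1.1, p2.1, p3.1, p4.1, (pvColStep t c 1 p5 i).1, p6.1, p7.1],
       [p0.2, p1.2, p2.2, p3.2, p4.2, (pvColStep t c 1 p5 i).2, p6.2, p7.2]) := by
  unfold pvInner pvColStep
  norm_num [List.getD, List.set]
  split_ifs <;> simp

lemma pvInner_col6 (t c i : Int) (p0 p1 p2 p3 p4 p5 p6 p7 : List Int × List Int) :
    pvInner t c i ([p0.1, p1.1, p2.1, p3.1, p4.1, p5.1, p6.1, p7.1],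
                   [p0.2, p1.2, p2.2, p3.2, p4.2, p5.2, p6.2, p7.2]) 6
    = ([p0.1, p1.1, p2.1, p3.1, p4.1, p5.1, (pvColStep t c 2 p6 i).1, p7.1],
       [p0.2, p1.2, p2.2, p3.2, p4.2, p5.2, (pvColStep t c 2 p6 i).2, p7.2]) := by
  unfold pvInner pvColStep
  norm_num [List.getD, List.set]
  split_ifs <;> simp

lemma pvInner_col7 (t c i : Int) (p0 p1 p2 p3 p4 p5 p6 p7 : List Int × List Int) :
    pvInner t c i ([p0.1, p1.1, p2.1, p3.1, p4.1, p5.1, p6.1, p7.1],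
                   [p0.2, p1.2, p2.2, p3.2, p4.2, p5.2, p6.2, p7.2]) 7
    = ([p0.1, p1.1, p2.1, p3.1, p4.1, p5.1, p6.1, (pvColStep t c 3 p7 i).1],
       [p0.2, p1.2, p2.2, p3.2, p4.2, p5.2, p6.2, (pvColStep t c 3 p7 i).2]) := by
  unfold pvInner pvColStep
  norm_num [List.getD, List.set]
  split_ifs <;> simp

-- one full row of A's second loop = one pvColStep on each of the eight columns
lemma pvRow_eq (t c i : Int) (p0 p1 p2 p3 p4 p5 p6 p7 : List Int × List Int) :
    (List.range 8).foldl (pvInner t c i)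
      ([p0.1, p1.1, p2.1, p3.1, p4.1, p5.1, p6.1, p7.1],
       [p0.2, p1.2, p2.2, p3.2, p4.2, p5.2, p6.2, p7.2])
    = ([(pvColStep t c 0 p0 i).1, (pvColStep t c 1 p1 i).1, (pvColStep t c 2 p2 i).1,
        (pvColStep t c 3 p3 i).1, (pvColStep t c 0 p4 i).1, (pvColStep t c 1 p5 i).1,
        (pvColStep t c 2 p6 i).1, (pvColStep t c 3 p7 i).1],
       [(pvColStep t c 0 p0 i).2, (pvColStep t c 1 p1 i).2, (pvColStep t c 2 p2 i).2,
        (pvColStep t c 3 p3 i).2, (pvColStep t c 0 p4 i).2, (pvColStep t c 1 p5 i).2,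
        (pvColStep t c 2 p6 i).2, (pvColStep t c 3 p7 i).2]) := by
  show List.foldl (pvInner t c i) _ [0, 1, 2, 3, 4, 5, 6, 7] = _
  simp only [List.foldl_cons, List.foldl_nil]
  rw [pvInner_col0, pvInner_col1, pvInner_col2, pvInner_col3,
      pvInner_col4, pvInner_col5, pvInner_col6, pvInner_col7]

-- the whole second loop = the four per-phase folds, read back per column
lemma pvFold_eq (t c : Int) (L : List Int) :
    ∀ p0 p1 p2 p3 p4 p5 p6 p7 : List Int × List Int,
    L.foldl (fun st i => (List.range 8).foldl (pvInner t c i) st)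
      ([p0.1, p1.1, p2.1, p3.1, p4.1, p5.1, p6.1, p7.1],
       [p0.2, p1.2, p2.2, p3.2, p4.2, p5.2, p6.2, p7.2])
    = ([(L.foldl (pvColStep t c 0) p0).1, (L.foldl (pvColStep t c 1) p1).1,
        (L.foldl (pvColStep t c 2) p2).1, (L.foldl (pvColStep t c 3) p3).1,
        (L.foldl (pvColStep t c 0) p4).1, (L.foldl (pvColStep t c 1) p5).1,
        (L.foldl (pvColStep t c 2) p6).1, (L.foldl (pvColStep t c 3) p7).1],
       [(L.foldl (pvColStep t c 0) p0).2, (L.foldl (pvColStep t c 1) p1).2,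
        (L.foldl (pvColStep t c 2) p2).2, (L.foldl (pvColStep t c 3) p3).2,
        (L.foldl (pvColStep t c 0) p4).2, (L.foldl (pvColStep t c 1) p5).2,
        (L.foldl (pvColStep t c 2) p6).2, (L.foldl (pvColStep t c 3) p7).2]) := by
  induction L with
  | nil => intro p0 p1 p2 p3 p4 p5 p6 p7; simp
  | cons a L ih =>
    intro p0 p1 p2 p3 p4 p5 p6 p7
    simp only [List.foldl_cons]
    rw [pvRow_eq]
    exact ih (pvColStep t c 0 p0 a) (pvColStep t c 1 p1 a) (pvColStep t c 2 p2 a)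
      (pvColStep t c 3 p3 a) (pvColStep t c 0 p4 a) (pvColStep t c 1 p5 a)
      (pvColStep t c 2 p6 a) (pvColStep t c 3 p7 a)

lemma ports_eq (t c : Int) :
    make_traffic_light_table t c = make_traffic_light_table_alt t c := by
  unfold make_traffic_light_table make_traffic_light_table_alt
  have h := pvFold_eq t c (PySem.List.pyRange 0 (t.tdiv c + 1) 1)
    ([], []) ([], []) ([], []) ([], []) ([], []) ([], []) ([], []) ([], [])
  simp only [List.range, List.range.loop, List.foldl_cons, List.foldl_nil,
    List.nil_append, List.map_cons, List.map_nil] at h ⊢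
  exact h.trans (by simp [List.getD])

-- ===== VERDICT (by name: the statement is the Claim_ definition above) =====
theorem make_traffic_light_table_spec : Claim_equal_make_traffic_light_table := by
  intro t c _ _
  unfold Spec_make_traffic_light_table
  exact ports_eq t c
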